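-- pv_equiv track=rewrite | github.com/VitalBoss/Practice | sql_request.py | processing_str
-- ===== SOURCE A (Python) =====
-- def processing_str(str): # добавляем пробел между = и <>, также проверяем корректность скобочной последовательности
--     ans = ''
--     c = True
--     flag = True
--     sk = 0
--     for symb in str:
--         if symb == '(':
--             sk += 1
--         if symb == ')':
--             sk -= 1
--         if sk < 0:
--             flag = False
--         if not(c):
--             c = True
--         elif symb == '=':
--             ans = ans + ' ' + '=' + ' '
--         elif symb == '<':
--             ans = ans + ' ' + "<>" + ' '
--             c = False
--         else:
--             ans = ans + symb
--     if sk != 0: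
--         flag = False
--     return ans, flag
-- ===== SOURCE B (Python) =====
-- def processing_str(str):
--     # Pass 1: bracket validity only.
--     bal = 0
--     ok = True
--     for ch in str:
--         if ch == '(':
--             bal += 1
--         elif ch == ')':
--             bal -= 1
--             if bal < 0:
--                 ok = False
--     ok = ok and bal == 0
--     # Pass 2: build the spaced output, dropping the char right after '<'.
--     parts = []
--     i = 0
--     n = len(str)
--     while i < n:
--         ch = str[i]
--         if ch == '=':
--             parts.append(' = ')
--         elif ch == '<':
--             parts.append(' <> ')
--             i += 1  # skip the following character
--         else:
--             parts.append(ch)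
--         i += 1
--     return ''.join(parts), ok
-- ===== Notes on version B (the rewrite author's own statement) =====
-- stated objective: alternative
-- what changed: A's single loop interleaves output building (with a skip-next-char carry flag) and bracket checking in one 4-part state; B splits it into two independent passes: a balance-counter pass for validity and a recursive/index pass that builds the spaced output, skipping the character after '<'.
import Mathlib
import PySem

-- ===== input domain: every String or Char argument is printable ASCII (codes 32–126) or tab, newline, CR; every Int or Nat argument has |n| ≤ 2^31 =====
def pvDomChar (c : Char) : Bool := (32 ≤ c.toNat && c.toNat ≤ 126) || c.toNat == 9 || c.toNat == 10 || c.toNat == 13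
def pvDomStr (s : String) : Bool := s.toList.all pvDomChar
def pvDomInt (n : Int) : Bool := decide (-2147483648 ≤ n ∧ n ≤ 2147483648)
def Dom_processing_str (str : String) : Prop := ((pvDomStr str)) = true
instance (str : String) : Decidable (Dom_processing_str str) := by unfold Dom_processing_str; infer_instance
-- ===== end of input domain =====

-- B replaces A's single interleaved loop (with a skip-carry flag) by two independent passes:
-- a bracket-balance pass and a recursive output-building pass; alternative decomposition, not faster.

-- ===== PORT A =====
-- A's loop body over state (ans, c, flag, sk); ans kept as List Char, joined to String at the end.
def pvStepA (st : List Char × Bool × Bool × Int) (symb : Char) : List Char × Bool × Bool × Int :=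
  let ans := st.1
  let c := st.2.1
  let flag := st.2.2.1
  let sk := st.2.2.2
  let sk := if symb = '(' then sk + 1 else sk
  let sk := if symb = ')' then sk - 1 else sk
  let flag := if sk < 0 then false else flag
  if !c then (ans, true, flag, sk)
  else if symb = '=' then (ans ++ [' ', '=', ' '], c, flag, sk)
  else if symb = '<' then (ans ++ [' ', '<', '>', ' '], false, flag, sk)
  else (ans ++ [symb], c, flag, sk)

def processing_str (str : String) : String × Bool :=
  let r := str.toList.foldl pvStepA ([], true, true, 0)
  (String.mk r.1, if r.2.2.2 ≠ 0 then false else r.2.2.1)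

-- ===== PORT B =====
-- pass 1: bracket validity only, state (bal, ok)
def pvBalStep (st : Int × Bool) (ch : Char) : Int × Bool :=
  if ch = '(' then (st.1 + 1, st.2)
  else if ch = ')' then (st.1 - 1, if st.1 - 1 < 0 then false else st.2)
  else st

-- pass 2: build the output, skipping the character right after '<'
def pvBuild : List Char → List Char
  | [] => []
  | ch :: rest =>
    if ch = '=' then ' ' :: '=' :: ' ' :: pvBuild rest
    else if ch = '<' then
      ' ' :: '<' :: '>' :: ' ' ::
        (match rest with
         | [] => []
         | _ :: rest' => pvBuild rest')
    else ch :: pvBuild rest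

def processing_str_alt (str : String) : String × Bool :=
  let r := str.toList.foldl pvBalStep (0, true)
  (String.mk (pvBuild str.toList), r.2 && r.1 == 0)

-- ===== PRECONDITION & SPEC =====
def Spec_processing_str (str : String) (out : String × Bool) : Prop := out = processing_str_alt str
instance (str : String) (out : String × Bool) : Decidable (Spec_processing_str str out) := by unfold Spec_processing_str; infer_instance

-- ===== CLAIM (what is proved, stated in full; the proofs are below) =====
def Claim_equal_processing_str : Prop := ∀ (str : String), Dom_processing_str str → Spec_processing_str str (processing_str str)

-- ===== LEMMAS AND PROOFS =====

-- one A-step's (flag, sk) is the swapped B balance step (under the invariant sk<0 → flag=false)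
theorem pvStepA_snd (ans : List Char) (c flag : Bool) (sk : Int) (ch : Char)
    (h : sk < 0 → flag = false) :
    (pvStepA (ans, c, flag, sk) ch).2.2 = Prod.swap (pvBalStep (sk, flag) ch) := by
  by_cases h1 : ch = '('
  · have hf : (if sk + 1 < 0 then false else flag) = flag := by
      split_ifs with hs
      · exact (h (by omega)).symm
      · rfl
    subst h1
    simp [pvStepA, pvBalStep, Prod.swap, hf]
    split_ifs <;> rfl
  · by_cases h2 : ch = ')'
    · subst h2
      simp [pvStepA, pvBalStep, Prod.swap]
      split_ifs <;> rfl
    · have hf : (if sk < 0 then false else flag) = flag := by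
        split_ifs with hs
        · exact (h hs).symm
        · rfl
      simp [pvStepA, pvBalStep, Prod.swap, h1, h2, hf]
      split_ifs <;> rfl

-- the balance step preserves the invariant
theorem pvBalStep_inv (sk : Int) (flag : Bool) (ch : Char) (h : sk < 0 → flag = false) :
    (pvBalStep (sk, flag) ch).1 < 0 → (pvBalStep (sk, flag) ch).2 = false := by
  simp only [pvBalStep]
  split_ifs with a b c
  · intro hlt
    simp only at hlt
    exact h (by omega)
  · intro _
    rfl
  · intro hlt
    simp only at hlt
    exact absurd hlt c
  · intro hlt
    simp only at hlt
    exact h hlt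

-- (flag, sk) components of A's whole fold equal B's balance fold, swapped
theorem pv_skflag (l : List Char) : ∀ (ans : List Char) (c flag : Bool) (sk : Int),
    (sk < 0 → flag = false) →
    (l.foldl pvStepA (ans, c, flag, sk)).2.2 = Prod.swap (l.foldl pvBalStep (sk, flag)) := by
  induction l with
  | nil => intro ans c flag sk h; rfl
  | cons ch t ih =>
    intro ans c flag sk h
    rw [List.foldl_cons, List.foldl_cons]
    have hstep := pvStepA_snd ans c flag sk ch h
    rcases hp : pvStepA (ans, c, flag, sk) ch with ⟨ans', c', flag', sk'⟩
    rw [hp] at hstep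
    have hb : pvBalStep (sk, flag) ch = (sk', flag') := by
      rcases hq : pvBalStep (sk, flag) ch with ⟨b, o⟩
      rw [hq] at hstep
      simp [Prod.swap] at hstep
      simp [hstep.1, hstep.2]
    rw [hb]
    have hinv := pvBalStep_inv sk flag ch h
    rw [hb] at hinv
    exact ih ans' c' flag' sk' hinv

theorem pvBuild_cons (ch : Char) (rest : List Char) :
    pvBuild (ch :: rest) =
      if ch = '=' then ' ' :: '=' :: ' ' :: pvBuild rest
      else if ch = '<' then
        ' ' :: '<' :: '>' :: ' ' ::
          (match rest with
           | [] => []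
           | _ :: rest' => pvBuild rest')
      else ch :: pvBuild rest := by
  rw [pvBuild.eq_def]

-- step-evaluation lemmas for A's loop body
theorem pvStepA_skip (ans : List Char) (flag : Bool) (sk : Int) (x : Char) :
    pvStepA (ans, false, flag, sk) x =
      (ans, true, (pvStepA (ans, false, flag, sk) x).2.2.1, (pvStepA (ans, false, flag, sk) x).2.2.2) := by
  simp [pvStepA]

theorem pvStepA_eqc (ans : List Char) (flag : Bool) (sk : Int) :
    pvStepA (ans, true, flag, sk) '=' = (ans ++ [' ', '=', ' '], true, if sk < 0 then false else flag, sk) := by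
  simp [pvStepA]

theorem pvStepA_lt (ans : List Char) (flag : Bool) (sk : Int) :
    pvStepA (ans, true, flag, sk) '<' = (ans ++ [' ', '<', '>', ' '], false, if sk < 0 then false else flag, sk) := by
  simp [pvStepA]

theorem pvStepA_other (ans : List Char) (flag : Bool) (sk : Int) (ch : Char)
    (h1 : ch ≠ '=') (h2 : ch ≠ '<') :
    pvStepA (ans, true, flag, sk) ch =
      (ans ++ [ch], true, (pvStepA (ans, true, flag, sk) ch).2.2.1, (pvStepA (ans, true, flag, sk) ch).2.2.2) := by
  simp [pvStepA, h1, h2]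

-- the ans component of A's fold (started with c = true) is ans ++ pvBuild l
theorem pv_build_aux (n : Nat) : ∀ (l : List Char), l.length ≤ n → ∀ (ans : List Char) (flag : Bool) (sk : Int),
    (l.foldl pvStepA (ans, true, flag, sk)).1 = ans ++ pvBuild l := by
  induction n with
  | zero =>
    intro l hl ans flag sk
    rcases l with _ | ⟨ch, rest⟩
    · simp [pvBuild]
    · simp at hl
  | succ n ihn =>
    intro l hl ans flag sk
    rcases l with _ | ⟨ch, rest⟩
    · simp [pvBuild]
    · have hr : rest.length ≤ n := by simp at hl; omega
      by_cases h1 : ch = '='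
      · subst h1
        rw [List.foldl_cons, pvStepA_eqc, ihn rest hr, pvBuild_cons]
        simp
      · by_cases h2 : ch = '<'
        · subst h2
          rcases rest with _ | ⟨x, rest'⟩
          · rw [List.foldl_cons, pvStepA_lt, pvBuild_cons]
            simp
          · have hr' : rest'.length ≤ n := by simp at hl; omega
            rw [List.foldl_cons, List.foldl_cons, pvStepA_lt, pvStepA_skip, ihn rest' hr', pvBuild_cons]
            simp
        · rw [List.foldl_cons, pvStepA_other ans flag sk ch h1 h2, ihn rest hr, pvBuild_cons]
          simp [h1, h2]

theorem pv_build (l : List Char) (ans : List Char) (flag : Bool) (sk : Int) :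
    (l.foldl pvStepA (ans, true, flag, sk)).1 = ans ++ pvBuild l :=
  pv_build_aux l.length l le_rfl ans flag sk

-- ===== VERDICT (by name: the statement is the Claim_ definition above) =====
theorem processing_str_spec : Claim_equal_processing_str := by
  intro str _
  unfold Spec_processing_str processing_str processing_str_alt
  have h1 := pv_skflag str.toList [] true true 0 (by intro h; omega)
  have h2 := pv_build str.toList [] true 0
  rcases hq : str.toList.foldl pvBalStep (0, true) with ⟨bal, ok⟩
  rw [hq] at h1
  simp only [Prod.swap] at h1
  simp only [h1, h2, List.nil_append, Prod.mk.injEq]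
  refine ⟨trivial, ?_⟩
  by_cases hb : bal = 0 <;> simp [hb]
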